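-- pv_equiv track=rewrite | github.com/zavolanlab/htsinfer | htsinfer/motif_enrichment.py | motif_adding_background
-- ===== SOURCE A (Python) =====
-- from typing import (Dict, List)
--
-- def motif_adding_background(
--         foreground: Dict[str, int],
--         background: Dict[str, int]
-- ) -> Dict:
--     """Creates dictionary with motifs included in background but
--         not foreground. Increases count of motifs with similar lengths
--         in background by one for each motif missing in foreground.
--         Adds pseudo-code of 1 to each motif added to foreground.
--         Increases count of motifs with similar lengths
--         in foreground by one for each added motif.
--
--     Args:
--         foreground: dictionary of motifs with counts
--         background: dictionary of motifs with counts
--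
--     Returns:
--         Dictionary with motifs missing in foreground.
--
--     Example:
--         foreground = {"UGAUUC": 5, "UAAACC": 3, "AAGUUACCU": 2,
--                       "AAGCCUU": 1, "AGUUCUA": 1, "UUUCCCG": 5}
--         background = {"UGAUUC": 9, "UAAACC": 1, "AAGUUACCU": 3,
--                       "AAGCCUU": 1, "AGUUCUA": 4, "UUUCCCG": 3}
--         >>> motif_adding_background(foreground, background)
--             {'UAAACC': 1, 'UUUAAG': 1}
--     """
--     # Pseudocode dictionary background
--     pseudocode_motifs_background: Dict = dict()
--
--     # Add background motifs to pseudocode dictionary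
--     for i in background:
--
--         if i in foreground:
--             pass
--         else:
--             pseudocode_motifs_background[i] = background[i]
--             # Increase counts by amount of motifs added
--             for value in foreground:
--                 if len(value) == len(i):
--                     foreground[value] += 1
--             for value in background:
--                 if len(value) == len(i):
--                     background[value] += 1
--             pseudocode_motifs_background[i] = 1
--
--     return pseudocode_motifs_background
-- ===== SOURCE B (Python) =====
-- def motif_adding_background(foreground, background):
--     # Collect background-only motifs once, count them per length, then apply
--     # all count increments to each dict in a single linear pass.
--     # Same in-place count mutations of both argument dicts as the original.
--     missing = [m for m in background if m not in foreground]
--     added_per_len = {}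
--     for m in missing:
--         added_per_len[len(m)] = added_per_len.get(len(m), 0) + 1
--     for d in (foreground, background):
--         for k in d:
--             d[k] += added_per_len.get(len(k), 0)
--     return dict.fromkeys(missing, 1)
-- ===== Notes on version B (the rewrite author's own statement) =====
-- stated objective: faster
-- what changed: Instead of rescanning both whole dicts for every background-only motif (nested loops), B collects the missing motifs in one pass, tallies them per length in a dict, and applies all increments to each dict in a single linear pass; the returned dict is built directly from the missing motifs.
import Mathlib
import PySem

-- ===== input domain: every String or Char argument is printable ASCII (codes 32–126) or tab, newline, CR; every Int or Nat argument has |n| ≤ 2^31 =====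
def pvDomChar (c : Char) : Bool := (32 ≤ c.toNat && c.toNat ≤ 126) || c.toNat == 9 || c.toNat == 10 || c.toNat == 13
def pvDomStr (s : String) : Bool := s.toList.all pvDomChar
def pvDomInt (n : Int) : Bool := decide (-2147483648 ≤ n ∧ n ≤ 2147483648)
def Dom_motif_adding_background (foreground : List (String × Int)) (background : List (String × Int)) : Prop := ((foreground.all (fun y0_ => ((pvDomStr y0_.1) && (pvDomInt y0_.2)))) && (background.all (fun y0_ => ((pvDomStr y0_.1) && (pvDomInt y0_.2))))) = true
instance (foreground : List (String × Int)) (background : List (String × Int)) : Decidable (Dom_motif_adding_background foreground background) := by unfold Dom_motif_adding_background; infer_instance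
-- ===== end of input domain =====

-- B replaces A's per-missing-motif rescans of both dicts by one tally-per-length pass (faster);
-- both Pythons mutate the argument dicts identically; the theorems here are about the return value.

-- ===== PORT A =====
-- loop body of 'for i in background:' (state: pseudocode dict, foreground, background)
def pvBodyA (st : PySem.Dict String Int × PySem.Dict String Int × PySem.Dict String Int)
    (i : String) : PySem.Dict String Int × PySem.Dict String Int × PySem.Dict String Int :=
  let res := st.1
  let fg := st.2.1
  let bg := st.2.2
  if fg.contains i then st
  else
    let res := res.insert i (bg.getD i 0)
    -- for value in foreground: if len(value) == len(i): foreground[value] += 1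
    let fg := fg.keys.foldl
      (fun d v => if PySem.Str.len v = PySem.Str.len i then d.modify v 0 (fun x => x + 1) else d) fg
    -- for value in background: if len(value) == len(i): background[value] += 1
    let bg := bg.keys.foldl
      (fun d v => if PySem.Str.len v = PySem.Str.len i then d.modify v 0 (fun x => x + 1) else d) bg
    let res := res.insert i 1
    (res, fg, bg)

def motif_adding_background (foreground : List (String × Int)) (background : List (String × Int)) :
    List (String × Int) :=
  let fgd := PySem.Dict.ofList foreground
  let bgd := PySem.Dict.ofList background
  ((bgd.keys).foldl pvBodyA (PySem.Dict.empty, fgd, bgd)).1.items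

-- ===== PORT B =====
def motif_adding_background_alt (foreground : List (String × Int)) (background : List (String × Int)) :
    List (String × Int) :=
  let fgd := PySem.Dict.ofList foreground
  let bgd := PySem.Dict.ofList background
  let missing := bgd.keys.filter (fun m => !(fgd.contains m))
  -- tally per length (feeds only the in-place count mutations, not the return value)
  let _added_per_len := missing.foldl
    (fun d m => d.insert (PySem.Str.len m) (d.getD (PySem.Str.len m) 0 + 1))
    (PySem.Dict.empty : PySem.Dict Int Int)
  -- return dict.fromkeys(missing, 1)
  (PySem.List.dedup missing).map (fun m => (m, (1 : Int)))

-- ===== PRECONDITION & SPEC =====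
def Spec_motif_adding_background (foreground : List (String × Int)) (background : List (String × Int)) (out : List (String × Int)) : Prop := out = motif_adding_background_alt foreground background
instance (foreground : List (String × Int)) (background : List (String × Int)) (out : List (String × Int)) : Decidable (Spec_motif_adding_background foreground background out) := by unfold Spec_motif_adding_background; infer_instance

-- ===== CLAIM (what is proved, stated in full; the proofs are below) =====
def Claim_equal_motif_adding_background : Prop := ∀ (foreground : List (String × Int)) (background : List (String × Int)), Dom_motif_adding_background foreground background → Spec_motif_adding_background foreground background (motif_adding_background foreground background)

-- ===== LEMMAS AND PROOFS =====

-- a modify-loop over keys already present does not change containment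
lemma contains_foldl_modify (P : String → Prop) [DecidablePred P] :
    ∀ (l : List String) (d : PySem.Dict String Int),
      (∀ v ∈ l, d.contains v = true) →
      ∀ k, ((l.foldl (fun d v => if P v then d.modify v 0 (fun x => x + 1) else d) d).contains k)
            = d.contains k := by
  intro l
  induction l with
  | nil => intro d _ k; rfl
  | cons v l ih =>
    intro d hmem k
    simp only [List.foldl_cons]
    have hv : d.contains v = true := hmem v (by simp)
    by_cases hP : P v
    · have hstep : ∀ k, ((d.modify v 0 (fun x => x + 1)).contains k) = d.contains k := by
        intro k
        rw [PySem.Dict.contains_modify]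
        by_cases hk : (k == v)
        · have : k = v := by simpa using hk
          simp [this, hv]
        · simp [hk]
      rw [if_pos hP, ih _ (fun w hw => by rw [hstep]; exact hmem w (by simp [hw])) k, hstep]
    · rw [if_neg hP]
      exact ih _ (fun w hw => hmem w (by simp [hw])) k

-- the main loop's first component only accumulates (i, 1) for keys missing from foreground
lemma loop_fst (c : String → Bool) :
    ∀ (l : List String) (res fg bg : PySem.Dict String Int),
      (∀ k, fg.contains k = c k) →
      (l.foldl pvBodyA (res, fg, bg)).1
        = l.foldl (fun r i => if c i then r else r.insert i 1) res := by
  intro l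
  induction l with
  | nil => intro res fg bg _; rfl
  | cons i l ih =>
    intro res fg bg hc
    simp only [List.foldl_cons]
    by_cases hi : c i = true
    · have : pvBodyA (res, fg, bg) i = (res, fg, bg) := by
        simp [pvBodyA, hc i, hi]
      rw [this, if_pos hi]
      exact ih res fg bg hc
    · have hfg : fg.contains i = false := by
        rw [hc i]; exact Bool.not_eq_true _ ▸ (by simpa using hi)
      have hbody : pvBodyA (res, fg, bg) i
          = (res.insert i 1,
             fg.keys.foldl (fun d v => if PySem.Str.len v = PySem.Str.len i then d.modify v 0 (fun x => x + 1) else d) fg,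
             bg.keys.foldl (fun d v => if PySem.Str.len v = PySem.Str.len i then d.modify v 0 (fun x => x + 1) else d) bg) := by
        simp [pvBodyA, hfg, PySem.Dict.insert_insert_self]
      rw [hbody, if_neg hi]
      apply ih
      intro k
      rw [contains_foldl_modify _ fg.keys fg
            (fun v hv => (PySem.Dict.contains_iff_mem_keys fg v).2 hv) k]
      exact hc k

theorem motif_adding_background_spec : Claim_equal_motif_adding_background := by
  intro foreground background _
  unfold Spec_motif_adding_background motif_adding_background motif_adding_background_alt
  set fgd := PySem.Dict.ofList foreground with hfgd
  set bgd := PySem.Dict.ofList background with hbgd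
  have h1 := loop_fst (fun i => fgd.contains i) bgd.keys PySem.Dict.empty fgd bgd (fun _ => rfl)
  simp only [h1]
  have h2 : bgd.keys.foldl (fun r i => if fgd.contains i then r else r.insert i 1)
      (PySem.Dict.empty : PySem.Dict String Int)
      = (bgd.keys.filter (fun m => !(fgd.contains m))).foldl (fun r i => r.insert i 1)
        (PySem.Dict.empty : PySem.Dict String Int) := by
    rw [← PySem.List.foldl_if_eq_foldl_filter]
    congr 1
    funext r i
    by_cases h : fgd.contains i <;> simp [h]
  rw [h2]
  have hnodup : (bgd.keys.filter (fun m => !(fgd.contains m))).Nodup :=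
    (PySem.Dict.nodup_keys_ofList background).filter _
  have hfresh := PySem.Dict.items_foldl_insert_fresh
      (l := bgd.keys.filter (fun m => !(fgd.contains m)))
      (k := fun a => a) (v := fun _ => (1 : Int)) (d := PySem.Dict.empty)
      (by intro a _; exact PySem.Dict.contains_empty a)
      (by simpa using hnodup)
  simp only [hfresh]
  simp [PySem.Set.ofList_eq_self_of_nodup _ hnodup, PySem.Dict.empty]
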